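-- pv_equiv track=rewrite | github.com/jonathanherzig/semantic-parsing-annotation | grammar_generation/grammar_gen.py | violates_number_binding
-- ===== SOURCE A (Python) =====
-- def violates_number_binding(sent, domain):
--     """Check if generated number is nonsensical in terms of number bindings."""
--     if domain == 'geo880':
--         rels = ['density', 'area', 'length', 'elevation', 'population', 'density']
--         ents = ['sacramento', 'california', 'colorado river', 'lake tahoe', 'mount whitney',
--                 'death valley', 'usa']
--     else:
--         rels = ['citation count', 'publication year']
--         ents = ['noah smith', 'richard anderson', 'semantic parsing', 'deep learning', 'nature',
--                 'acl', 'cell', 'neural attention', 'reviews', 'blogs']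
--
--     # e.g., "number of california"
--     for e in ents:
--         if 'number of {}'.format(e) in sent:
--             return True
--
--     is_check = False
--     for r in rels:
--         if 'whose {}'.format(r) in sent:
--             is_check = True
--             break
--     if not is_check:
--         return False
--     for i, r_1 in enumerate(rels):
--         bad_templates = [
--             'whose {} is {}'.format(r_1, 'number'),
--             'whose {} is not {}'.format(r_1, 'number'),
--             'whose {} is larger than {}'.format(r_1, 'number'),
--             'whose {} is smaller than {}'.format(r_1, 'number'),
--             'whose {} is {}'.format(r_1, 'total'),
--             'whose {} is not {}'.format(r_1, 'total'),
--             'whose {} is larger than {}'.format(r_1, 'total'),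
--             'whose {} is smaller than {}'.format(r_1, 'total'),
--             'whose {} is {}'.format(r_1, '0'),
--             'whose {} is not {}'.format(r_1, '0'),
--             'whose {} is larger than {}'.format(r_1, '0'),
--             'whose {} is smaller than {}'.format(r_1, '0'),
--         ]
--         for template in bad_templates:
--             if template in sent:
--                 return True
--         for j, r_2 in enumerate(rels):
--             bad_templates = [
--                 'whose {} is {}'.format(r_1, r_2),
--                 'whose {} is not {}'.format(r_1, r_2),
--                 'whose {} is larger than {}'.format(r_1, r_2),
--                 'whose {} is smaller than {}'.format(r_1, r_2),
--             ]
--             if j!=i: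
--                 for template in bad_templates:
--                     if template in sent:
--                         return True
--     return False
-- ===== SOURCE B (Python) =====
-- def _forms(r1, rhs):
--     return ['whose {} is {}'.format(r1, rhs),
--             'whose {} is not {}'.format(r1, rhs),
--             'whose {} is larger than {}'.format(r1, rhs),
--             'whose {} is smaller than {}'.format(r1, rhs)]
--
--
-- def violates_number_binding(sent, domain):
--     """Check if generated number is nonsensical in terms of number bindings."""
--     if domain == 'geo880':
--         rels = ['density', 'area', 'length', 'elevation', 'population', 'density']
--         ents = ['sacramento', 'california', 'colorado river', 'lake tahoe', 'mount whitney',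
--                 'death valley', 'usa']
--     else:
--         rels = ['citation count', 'publication year']
--         ents = ['noah smith', 'richard anderson', 'semantic parsing', 'deep learning', 'nature',
--                 'acl', 'cell', 'neural attention', 'reviews', 'blogs']
--
--     phrases = ['number of {}'.format(e) for e in ents]
--     for i, r1 in enumerate(rels):
--         for v in ['number', 'total', '0']:
--             phrases.extend(_forms(r1, v))
--         for j, r2 in enumerate(rels):
--             if j != i:
--                 phrases.extend(_forms(r1, r2))
--     return any(p in sent for p in phrases)
-- ===== Notes on version B (the rewrite author's own statement) =====
-- stated objective: simpler
-- what changed: B builds one flat table of all forbidden phrases (entity 'number of' phrases plus the value and relation-pair templates via a shared _forms helper) and returns any(p in sent), dropping A's redundant is_check guard and its nested early-return scans.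
import Mathlib
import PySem

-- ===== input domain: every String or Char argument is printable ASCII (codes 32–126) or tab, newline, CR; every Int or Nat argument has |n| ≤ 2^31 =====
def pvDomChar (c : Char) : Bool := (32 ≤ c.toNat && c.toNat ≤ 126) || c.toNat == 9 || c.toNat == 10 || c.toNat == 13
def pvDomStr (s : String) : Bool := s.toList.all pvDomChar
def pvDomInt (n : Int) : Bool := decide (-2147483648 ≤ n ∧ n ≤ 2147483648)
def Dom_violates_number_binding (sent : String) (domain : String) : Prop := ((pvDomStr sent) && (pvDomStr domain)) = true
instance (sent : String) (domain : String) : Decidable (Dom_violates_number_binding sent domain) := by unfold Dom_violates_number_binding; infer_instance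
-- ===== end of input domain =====

-- B builds one flat table of all forbidden phrases and scans it once, dropping A's
-- redundant is_check guard; objective: simpler decomposition (no speed claim).

-- ===== PORT A =====
-- the 12 value templates for one relation r1 (the literal bad_templates list of A)
def pvA_badTemplates (r1 : String) : List String :=
  ["whose " ++ r1 ++ " is " ++ "number",
   "whose " ++ r1 ++ " is not " ++ "number",
   "whose " ++ r1 ++ " is larger than " ++ "number",
   "whose " ++ r1 ++ " is smaller than " ++ "number",
   "whose " ++ r1 ++ " is " ++ "total",
   "whose " ++ r1 ++ " is not " ++ "total",
   "whose " ++ r1 ++ " is larger than " ++ "total",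
   "whose " ++ r1 ++ " is smaller than " ++ "total",
   "whose " ++ r1 ++ " is " ++ "0",
   "whose " ++ r1 ++ " is not " ++ "0",
   "whose " ++ r1 ++ " is larger than " ++ "0",
   "whose " ++ r1 ++ " is smaller than " ++ "0"]

def violates_number_binding (sent : String) (domain : String) : Bool :=
  let rels : List String :=
    if domain == "geo880" then
      ["density", "area", "length", "elevation", "population", "density"]
    else ["citation count", "publication year"]
  let ents : List String :=
    if domain == "geo880" then
      ["sacramento", "california", "colorado river", "lake tahoe", "mount whitney",
       "death valley", "usa"]
    else ["noah smith", "richard anderson", "semantic parsing", "deep learning", "nature",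
          "acl", "cell", "neural attention", "reviews", "blogs"]
  -- for e in ents: if 'number of {}'.format(e) in sent: return True
  if ents.any (fun e => PySem.Str.isIn ("number of " ++ e) sent) then true
  else
    -- is_check loop with break
    let is_check := rels.any (fun r => PySem.Str.isIn ("whose " ++ r) sent)
    if !is_check then false
    else
      -- for i, r_1 in enumerate(rels): … early return True on any hit
      (PySem.List.enumerate rels).any (fun ir =>
        (pvA_badTemplates ir.2).any (fun t => PySem.Str.isIn t sent) ||
        (PySem.List.enumerate rels).any (fun jr =>
          decide (jr.1 ≠ ir.1) &&
          (["whose " ++ ir.2 ++ " is " ++ jr.2,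
             "whose " ++ ir.2 ++ " is not " ++ jr.2,
             "whose " ++ ir.2 ++ " is larger than " ++ jr.2,
             "whose " ++ ir.2 ++ " is smaller than " ++ jr.2]).any (fun t => PySem.Str.isIn t sent)))

-- ===== PORT B =====
-- _forms r1 rhs : the four comparison phrases for one left/right pair
def pvB_forms (r1 rhs : String) : List String :=
  ["whose " ++ r1 ++ " is " ++ rhs,
   "whose " ++ r1 ++ " is not " ++ rhs,
   "whose " ++ r1 ++ " is larger than " ++ rhs,
   "whose " ++ r1 ++ " is smaller than " ++ rhs]

-- the flat table of every forbidden phrase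
def pvB_phrases (rels ents : List String) : List String :=
  ents.map (fun e => "number of " ++ e) ++
  (PySem.List.enumerate rels).flatMap (fun ir =>
    (["number", "total", "0"].flatMap (fun v => pvB_forms ir.2 v)) ++
    (PySem.List.enumerate rels).flatMap (fun jr =>
      if jr.1 ≠ ir.1 then pvB_forms ir.2 jr.2 else []))

def violates_number_binding_alt (sent : String) (domain : String) : Bool :=
  let rels : List String :=
    if domain == "geo880" then
      ["density", "area", "length", "elevation", "population", "density"]
    else ["citation count", "publication year"]
  let ents : List String :=
    if domain == "geo880" then
      ["sacramento", "california", "colorado river", "lake tahoe", "mount whitney",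
       "death valley", "usa"]
    else ["noah smith", "richard anderson", "semantic parsing", "deep learning", "nature",
          "acl", "cell", "neural attention", "reviews", "blogs"]
  (pvB_phrases rels ents).any (fun p => PySem.Str.isIn p sent)

-- ===== PRECONDITION & SPEC =====
def Spec_violates_number_binding (sent : String) (domain : String) (out : Bool) : Prop := out = violates_number_binding_alt sent domain
instance (sent : String) (domain : String) (out : Bool) : Decidable (Spec_violates_number_binding sent domain out) := by unfold Spec_violates_number_binding; infer_instance

-- ===== CLAIM (what is proved, stated in full; the proofs are below) =====
def Claim_equal_violates_number_binding : Prop := ∀ (sent : String) (domain : String), Dom_violates_number_binding sent domain → Spec_violates_number_binding sent domain (violates_number_binding sent domain)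

-- ===== LEMMAS AND PROOFS =====

lemma pv_isIn_append_left (x y s : String)
    (h : PySem.Str.isIn (x ++ y) s = true) : PySem.Str.isIn x s = true := by
  rw [PySem.Str.isIn_iff_infix] at h ⊢
  have hp : x.toList <+: (x ++ y).toList := by
    simp
  exact hp.isInfix.trans h
lemma pv_isIn_whose (s r1 mid rhs : String)
    (h : PySem.Str.isIn ("whose " ++ r1 ++ mid ++ rhs) s = true) :
    PySem.Str.isIn ("whose " ++ r1) s = true :=
  pv_isIn_append_left _ _ _ (pv_isIn_append_left _ _ _ h)
lemma pv_templ_eq (sent : String) (rels : List String) :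
    ((PySem.List.enumerate rels).flatMap (fun ir =>
      (["number", "total", "0"].flatMap (fun v => pvB_forms ir.2 v)) ++
      (PySem.List.enumerate rels).flatMap (fun jr =>
        if jr.1 ≠ ir.1 then pvB_forms ir.2 jr.2 else []))).any
        (fun p => PySem.Str.isIn p sent)
    = (PySem.List.enumerate rels).any (fun ir =>
        (pvA_badTemplates ir.2).any (fun t => PySem.Str.isIn t sent) ||
        (PySem.List.enumerate rels).any (fun jr =>
          decide (jr.1 ≠ ir.1) &&
          (["whose " ++ ir.2 ++ " is " ++ jr.2,
             "whose " ++ ir.2 ++ " is not " ++ jr.2,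
             "whose " ++ ir.2 ++ " is larger than " ++ jr.2,
             "whose " ++ ir.2 ++ " is smaller than " ++ jr.2]).any (fun t => PySem.Str.isIn t sent))) := by
  rw [List.any_flatMap]
  apply PySem.List.any_congr_mem
  intro ir _
  rw [List.any_append, List.any_flatMap]
  congr 1
  · simp [pvB_forms, pvA_badTemplates, Bool.or_assoc]
  · rw [List.any_flatMap]
    apply PySem.List.any_congr_mem
    intro jr _
    by_cases hj : jr.1 ≠ ir.1 <;> simp [hj, pvB_forms]
lemma pv_templ_implies_check (sent : String) (rels : List String)
    (h : (PySem.List.enumerate rels).any (fun ir =>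
        (pvA_badTemplates ir.2).any (fun t => PySem.Str.isIn t sent) ||
        (PySem.List.enumerate rels).any (fun jr =>
          decide (jr.1 ≠ ir.1) &&
          (["whose " ++ ir.2 ++ " is " ++ jr.2,
             "whose " ++ ir.2 ++ " is not " ++ jr.2,
             "whose " ++ ir.2 ++ " is larger than " ++ jr.2,
             "whose " ++ ir.2 ++ " is smaller than " ++ jr.2]).any (fun t => PySem.Str.isIn t sent))) = true) :
    rels.any (fun r => PySem.Str.isIn ("whose " ++ r) sent) = true := by
  rw [List.any_eq_true] at h
  obtain ⟨ir, hmem, hir⟩ := h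
  have hr : ir.2 ∈ rels := by
    rw [PySem.List.mem_enumerate_iff] at hmem
    obtain ⟨k, hk, rfl⟩ := hmem; simp
  rw [List.any_eq_true]
  refine ⟨ir.2, hr, ?_⟩
  rcases Bool.or_eq_true_iff.mp hir with hbad | hpair
  · rw [List.any_eq_true] at hbad
    obtain ⟨t, ht, hin⟩ := hbad
    simp only [pvA_badTemplates, List.mem_cons, List.not_mem_nil, or_false] at ht
    rcases ht with rfl|rfl|rfl|rfl|rfl|rfl|rfl|rfl|rfl|rfl|rfl|rfl <;>
      exact pv_isIn_whose _ _ _ _ hin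
  · rw [List.any_eq_true] at hpair
    obtain ⟨jr, _, hj⟩ := hpair
    obtain ⟨-, hany⟩ := Bool.and_eq_true_iff.mp hj
    rw [List.any_eq_true] at hany
    obtain ⟨t, ht, hin⟩ := hany
    simp only [List.mem_cons, List.not_mem_nil, or_false] at ht
    rcases ht with rfl|rfl|rfl|rfl <;> exact pv_isIn_whose _ _ _ _ hin
lemma pv_body_eq (sent : String) (rels ents : List String) :
    (if ents.any (fun e => PySem.Str.isIn ("number of " ++ e) sent) then true
     else
       let is_check := rels.any (fun r => PySem.Str.isIn ("whose " ++ r) sent)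
       if !is_check then false
       else
         (PySem.List.enumerate rels).any (fun ir =>
           (pvA_badTemplates ir.2).any (fun t => PySem.Str.isIn t sent) ||
           (PySem.List.enumerate rels).any (fun jr =>
             decide (jr.1 ≠ ir.1) &&
             (["whose " ++ ir.2 ++ " is " ++ jr.2,
             "whose " ++ ir.2 ++ " is not " ++ jr.2,
             "whose " ++ ir.2 ++ " is larger than " ++ jr.2,
             "whose " ++ ir.2 ++ " is smaller than " ++ jr.2]).any (fun t => PySem.Str.isIn t sent))))
    = (pvB_phrases rels ents).any (fun p => PySem.Str.isIn p sent) := by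
  unfold pvB_phrases
  rw [List.any_append, List.any_map]
  rw [pv_templ_eq]
  by_cases hE : ents.any (fun e => PySem.Str.isIn ("number of " ++ e) sent) = true
  · simp only [hE, if_true, Function.comp_def, Bool.true_or]
  · rw [Bool.not_eq_true] at hE
    simp only [hE, Bool.false_eq_true, if_false, Function.comp_def, Bool.false_or]
    by_cases hT : (PySem.List.enumerate rels).any (fun ir =>
           (pvA_badTemplates ir.2).any (fun t => PySem.Str.isIn t sent) ||
           (PySem.List.enumerate rels).any (fun jr =>
             decide (jr.1 ≠ ir.1) &&
             (["whose " ++ ir.2 ++ " is " ++ jr.2,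
             "whose " ++ ir.2 ++ " is not " ++ jr.2,
             "whose " ++ ir.2 ++ " is larger than " ++ jr.2,
             "whose " ++ ir.2 ++ " is smaller than " ++ jr.2]).any (fun t => PySem.Str.isIn t sent))) = true
    · rw [hT, pv_templ_implies_check sent rels hT]; rfl
    · rw [Bool.not_eq_true] at hT
      rw [hT]
      cases rels.any (fun r => PySem.Str.isIn ("whose " ++ r) sent) <;> rfl

-- ===== VERDICT (by name: the statement is the Claim_ definition above) =====
theorem violates_number_binding_spec : Claim_equal_violates_number_binding := by
  intro sent domain _
  unfold Spec_violates_number_binding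
  unfold violates_number_binding violates_number_binding_alt
  by_cases h : domain == "geo880" <;> simp only [h, if_pos, Bool.false_eq_true, if_false] <;>
    exact pv_body_eq sent _ _
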